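-- pv_equiv track=rewrite | github.com/syriacoppola25-its/analisitesto | interfaccia.py | parolakpi
-- ===== SOURCE A (Python) =====
-- def parolakpi (paroledate):
--     listaparole = []
--     dizionario = {}
--     for a in paroledate:
--         p_pulita = a.strip(".,:;!?") #toglie la punteggiatura dalla parola
--         p_pulita = p_pulita.replace("\n", " ") #mette tutto su un'unica linea
--         listaparole.append(p_pulita)
--         if "" in listaparole:
--             listaparole.remove("") #il programma mi dava stringhe vuote nella lista, quindi le rimuovo
--         if p_pulita in dizionario:
--             dizionario[p_pulita] += 1
--         else:
--             dizionario[p_pulita] = 1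
--     p_corta = min(listaparole, key=len)
--     p_lunga = max(listaparole, key=len)
--     frequente = max(dizionario, key=dizionario.get)
--     return p_corta, p_lunga, frequente
-- ===== SOURCE B (Python) =====
-- def parolakpi(paroledate):
--     dizionario = {}
--     p_corta = None
--     p_lunga = None
--     for a in paroledate:
--         p = a.strip(".,:;!?").replace("\n", " ")
--         dizionario[p] = dizionario.get(p, 0) + 1
--         if p != "":
--             if p_corta is None or len(p) < len(p_corta):
--                 p_corta = p
--             if p_lunga is None or len(p_lunga) < len(p):
--                 p_lunga = p
--     best = None
--     for parola, conteggio in dizionario.items():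
--         if best is None or best[1] < conteggio:
--             best = (parola, conteggio)
--     frequente = best[0]
--     return p_corta, p_lunga, frequente
-- ===== Notes on version B (the rewrite author's own statement) =====
-- stated objective: simpler
-- what changed: Replaces the build-list-with-repeated-remove('') loop plus three separate reduction passes (min, max, max-by-count) by one fused pass that counts and tracks the running shortest/longest word, followed by a single first-wins scan of the frequency dict.
import Mathlib
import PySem

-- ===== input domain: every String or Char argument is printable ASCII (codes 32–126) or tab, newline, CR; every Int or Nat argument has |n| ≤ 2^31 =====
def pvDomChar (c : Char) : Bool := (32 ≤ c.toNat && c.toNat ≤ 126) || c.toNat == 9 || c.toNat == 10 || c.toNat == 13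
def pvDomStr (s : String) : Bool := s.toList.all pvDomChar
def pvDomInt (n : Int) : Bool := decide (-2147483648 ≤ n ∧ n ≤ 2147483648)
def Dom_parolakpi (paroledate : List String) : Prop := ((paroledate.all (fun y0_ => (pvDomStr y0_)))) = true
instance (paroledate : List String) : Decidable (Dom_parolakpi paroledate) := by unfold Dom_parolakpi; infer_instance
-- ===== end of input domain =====

-- B fuses the cleaning/counting/extrema into one pass and scans the dict once, instead of
-- A's build-list-with-remove("") loop followed by three separate reduction passes.

-- ===== PORT A =====
-- the cleaning of a word, a.strip(".,:;!?").replace("\n", " "), is written out inline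
def parolakpi (paroledate : List String) : String × String × String :=
  let st := paroledate.foldl
    (fun (st : List String × PySem.Dict String Int) a =>
      (if "" ∈ st.1 ++ [PySem.Str.replace (PySem.Str.stripChars a ".,:;!?") "\n" " "]
         then (PySem.List.remove?
                 (st.1 ++ [PySem.Str.replace (PySem.Str.stripChars a ".,:;!?") "\n" " "])
                 "").getD
                (st.1 ++ [PySem.Str.replace (PySem.Str.stripChars a ".,:;!?") "\n" " "])
         else st.1 ++ [PySem.Str.replace (PySem.Str.stripChars a ".,:;!?") "\n" " "],
       if st.2.contains (PySem.Str.replace (PySem.Str.stripChars a ".,:;!?") "\n" " ")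
         then st.2.modify (PySem.Str.replace (PySem.Str.stripChars a ".,:;!?") "\n" " ") 0 (· + 1)
         else st.2.insert (PySem.Str.replace (PySem.Str.stripChars a ".,:;!?") "\n" " ") 1))
    ([], PySem.Dict.empty)
  -- min/max(listaparole, key=len); max(dizionario, key=dizionario.get) — every key is
  -- present, so dizionario.get k is the stored count, ported as getD k 0
  match PySem.List.min? st.1 PySem.Str.len, PySem.List.max? st.1 PySem.Str.len,
        PySem.List.max? st.2.keys (fun k => st.2.getD k 0) with
  | some c, some l, some f => (c, l, f)
  | _, _, _ => ("", "", "")  -- unreachable under Pre_ (Python raises ValueError here)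

-- ===== PORT B =====
-- B's "p_corta is None or len(p) < len(p_corta): p_corta = p" update
def pvMinStep (acc : Option String) (x : String) : Option String :=
  match acc with
  | none => some x
  | some m => if PySem.Str.len x < PySem.Str.len m then some x else some m

-- B's "p_lunga is None or len(p_lunga) < len(p): p_lunga = p" update
def pvMaxStep (acc : Option String) (x : String) : Option String :=
  match acc with
  | none => some x
  | some m => if PySem.Str.len m < PySem.Str.len x then some x else some m

-- B's "best is None or best[1] < conteggio: best = (parola, conteggio)" update
def pvBestStep (acc : Option (String × Int)) (kv : String × Int) : Option (String × Int) :=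
  match acc with
  | none => some kv
  | some b => if b.2 < kv.2 then some kv else some b

def parolakpi_alt (paroledate : List String) : String × String × String :=
  let st := paroledate.foldl
    (fun (st : PySem.Dict String Int × Option String × Option String) a =>
      (st.1.insert (PySem.Str.replace (PySem.Str.stripChars a ".,:;!?") "\n" " ")
         (st.1.getD (PySem.Str.replace (PySem.Str.stripChars a ".,:;!?") "\n" " ") 0 + 1),
       if PySem.Str.replace (PySem.Str.stripChars a ".,:;!?") "\n" " " ≠ ""
         then pvMinStep st.2.1 (PySem.Str.replace (PySem.Str.stripChars a ".,:;!?") "\n" " ")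
         else st.2.1,
       if PySem.Str.replace (PySem.Str.stripChars a ".,:;!?") "\n" " " ≠ ""
         then pvMaxStep st.2.2 (PySem.Str.replace (PySem.Str.stripChars a ".,:;!?") "\n" " ")
         else st.2.2))
    (PySem.Dict.empty, none, none)
  let best := st.1.items.foldl pvBestStep none
  -- the three trackers are all `some` under Pre_ (in Python they would be None otherwise)
  ((st.2.1).getD "", (st.2.2).getD "", (best.map Prod.fst).getD "")

-- ===== PRECONDITION & SPEC =====
-- Pre_ excludes exactly the inputs on which Python A raises ValueError (min of an empty
-- sequence): lists where every word cleans to the empty string (including the empty list).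
def Pre_parolakpi (paroledate : List String) : Prop :=
  ∃ a ∈ paroledate, PySem.Str.replace (PySem.Str.stripChars a ".,:;!?") "\n" " " ≠ ""
instance (paroledate : List String) : Decidable (Pre_parolakpi paroledate) := by
  unfold Pre_parolakpi; infer_instance
def pvWitness_parolakpi : List String := ["ciao", "mondo."]

def Spec_parolakpi (paroledate : List String) (out : String × String × String) : Prop := out = parolakpi_alt paroledate
instance (paroledate : List String) (out : String × String × String) : Decidable (Spec_parolakpi paroledate out) := by unfold Spec_parolakpi; infer_instance

-- ===== CLAIM (what is proved, stated in full; the proofs are below) =====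
def Claim_equal_parolakpi : Prop := ∀ (paroledate : List String), Dom_parolakpi paroledate → Pre_parolakpi paroledate → Spec_parolakpi paroledate (parolakpi paroledate)

-- ===== LEMMAS AND PROOFS =====

lemma pv_eraseIdx_append (acc : List String) (x : String) :
    (acc ++ [x]).eraseIdx acc.length = acc := by
  induction acc with
  | nil => rfl
  | cons a t ih => simpa using ih

-- A's dict branch is exactly Counter's modify step
lemma pv_dict_step (d : PySem.Dict String Int) (p : String) :
    (if d.contains p then d.modify p 0 (· + 1) else d.insert p 1) = d.modify p 0 (· + 1) := by
  by_cases h : d.contains p = true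
  · simp [h]
  · simp only [h, Bool.false_eq_true, if_false, PySem.Dict.modify]
    rw [PySem.Dict.getD_of_not_contains d 0 (by simpa using h)]
    norm_num

-- A's append-then-remove("") step keeps exactly the non-empty cleaned words
lemma pv_list_step (acc : List String) (p : String) (h : "" ∉ acc) :
    (if "" ∈ acc ++ [p] then (PySem.List.remove? (acc ++ [p]) "").getD (acc ++ [p]) else acc ++ [p])
      = acc ++ (if p ≠ "" then [p] else []) := by
  by_cases hp : p = ""
  · subst hp
    rw [if_pos (by simp)]
    have hidx := PySem.List.index?_append_singleton_self acc "" h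
    rw [PySem.List.index?_eq_idxOf?] at hidx
    simp [PySem.List.remove?, hidx, pv_eraseIdx_append]
  · have hmem : "" ∉ acc ++ [p] := by
      intro hmem
      rcases List.mem_append.mp hmem with h1 | h1
      · exact h h1
      · exact hp ((List.mem_singleton.mp h1)).symm
    rw [if_neg hmem]
    simp [hp]

-- the A loop, characterised: state = (non-empty cleaned words, Counter fold)
set_option maxHeartbeats 1000000 in
lemma pv_A_fold (l : List String) (acc : List String) (d : PySem.Dict String Int)
    (h : "" ∉ acc) :
    l.foldl (fun (st : List String × PySem.Dict String Int) a =>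
      (if "" ∈ st.1 ++ [(PySem.Str.replace (PySem.Str.stripChars a ".,:;!?") "\n" " ")]
         then (PySem.List.remove? (st.1 ++ [(PySem.Str.replace (PySem.Str.stripChars a ".,:;!?") "\n" " ")]) "").getD (st.1 ++ [(PySem.Str.replace (PySem.Str.stripChars a ".,:;!?") "\n" " ")])
         else st.1 ++ [(PySem.Str.replace (PySem.Str.stripChars a ".,:;!?") "\n" " ")],
       if st.2.contains ((PySem.Str.replace (PySem.Str.stripChars a ".,:;!?") "\n" " ")) then st.2.modify ((PySem.Str.replace (PySem.Str.stripChars a ".,:;!?") "\n" " ")) 0 (· + 1)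
         else st.2.insert ((PySem.Str.replace (PySem.Str.stripChars a ".,:;!?") "\n" " ")) 1)) (acc, d)
      = (acc ++ (l.map (fun a => PySem.Str.replace (PySem.Str.stripChars a ".,:;!?") "\n" " ")).filter (· ≠ ""),
         (l.map (fun a => PySem.Str.replace (PySem.Str.stripChars a ".,:;!?") "\n" " ")).foldl (fun d x => d.modify x 0 (· + 1)) d) := by
  induction l generalizing acc d with
  | nil => simp
  | cons a t ih =>
    rw [List.foldl_cons]
    dsimp only
    rw [pv_list_step acc ((PySem.Str.replace (PySem.Str.stripChars a ".,:;!?") "\n" " ")) h, pv_dict_step d ((PySem.Str.replace (PySem.Str.stripChars a ".,:;!?") "\n" " "))]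
    by_cases hp : (PySem.Str.replace (PySem.Str.stripChars a ".,:;!?") "\n" " ") = ""
    · rw [if_neg (by simp [hp]), List.append_nil, ih acc _ h]
      simp [hp]
    · rw [if_pos hp, ih (acc ++ [(PySem.Str.replace (PySem.Str.stripChars a ".,:;!?") "\n" " ")]) _ (by
        intro hmem
        rcases List.mem_append.mp hmem with h1 | h1
        · exact h h1
        · exact hp ((List.mem_singleton.mp h1)).symm)]
      simp [hp]

-- a fold over a triple state splits into three independent folds
lemma pv_split3 {α σ₁ σ₂ σ₃ : Type} (f1 : σ₁ → α → σ₁) (f2 : σ₂ → α → σ₂)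
    (f3 : σ₃ → α → σ₃) (l : List α) (a : σ₁) (b : σ₂) (c : σ₃) :
    l.foldl (fun s x => (f1 s.1 x, f2 s.2.1 x, f3 s.2.2 x)) (a, b, c)
      = (l.foldl f1 a, l.foldl f2 b, l.foldl f3 c) := by
  induction l generalizing a b c with
  | nil => rfl
  | cons x t ih => simp only [List.foldl_cons]; exact ih _ _ _

-- a fold that skips "" is a fold over the filtered list
lemma pv_skip_empty {β : Type} (f : β → String → β) (ws : List String) (co : β) :
    ws.foldl (fun acc p => if p ≠ "" then f acc p else acc) co
      = (ws.filter (· ≠ "")).foldl f co := by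
  induction ws generalizing co with
  | nil => rfl
  | cons a t ih =>
    by_cases hp : a = ""
    · simp only [List.foldl_cons, List.filter_cons, hp]
      simpa using ih co
    · simp only [List.foldl_cons, List.filter_cons, ne_eq, hp, not_false_eq_true, if_true,
        decide_not]
      simpa [hp] using ih (f co a)

-- the B loop, characterised: state = (Counter, first-shortest, first-longest)
set_option maxHeartbeats 1000000 in
lemma pv_B_eval (l : List String) :
    l.foldl (fun (st : PySem.Dict String Int × Option String × Option String) a =>
      (st.1.insert ((PySem.Str.replace (PySem.Str.stripChars a ".,:;!?") "\n" " ")) (st.1.getD ((PySem.Str.replace (PySem.Str.stripChars a ".,:;!?") "\n" " ")) 0 + 1),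
       if (PySem.Str.replace (PySem.Str.stripChars a ".,:;!?") "\n" " ") ≠ "" then pvMinStep st.2.1 ((PySem.Str.replace (PySem.Str.stripChars a ".,:;!?") "\n" " ")) else st.2.1,
       if (PySem.Str.replace (PySem.Str.stripChars a ".,:;!?") "\n" " ") ≠ "" then pvMaxStep st.2.2 ((PySem.Str.replace (PySem.Str.stripChars a ".,:;!?") "\n" " ")) else st.2.2))
      (PySem.Dict.empty, none, none)
    = (PySem.Dict.counter (l.map (fun a => PySem.Str.replace (PySem.Str.stripChars a ".,:;!?") "\n" " ")),
       PySem.List.min? ((l.map (fun a => PySem.Str.replace (PySem.Str.stripChars a ".,:;!?") "\n" " ")).filter (· ≠ "")) PySem.Str.len,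
       PySem.List.max? ((l.map (fun a => PySem.Str.replace (PySem.Str.stripChars a ".,:;!?") "\n" " ")).filter (· ≠ "")) PySem.Str.len) := by
  refine (pv_split3
    (fun (d : PySem.Dict String Int) a => d.insert ((PySem.Str.replace (PySem.Str.stripChars a ".,:;!?") "\n" " ")) (d.getD ((PySem.Str.replace (PySem.Str.stripChars a ".,:;!?") "\n" " ")) 0 + 1))
    (fun (co : Option String) a => if (PySem.Str.replace (PySem.Str.stripChars a ".,:;!?") "\n" " ") ≠ "" then pvMinStep co ((PySem.Str.replace (PySem.Str.stripChars a ".,:;!?") "\n" " ")) else co)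
    (fun (lo : Option String) a => if (PySem.Str.replace (PySem.Str.stripChars a ".,:;!?") "\n" " ") ≠ "" then pvMaxStep lo ((PySem.Str.replace (PySem.Str.stripChars a ".,:;!?") "\n" " ")) else lo)
    l PySem.Dict.empty none none).trans ?_
  refine congrArg₂ Prod.mk ?_ (congrArg₂ Prod.mk ?_ ?_)
  · exact ((List.foldl_map (f := fun a => PySem.Str.replace (PySem.Str.stripChars a ".,:;!?") "\n" " ")
      (g := fun (d : PySem.Dict String Int) x => d.insert x (d.getD x 0 + 1))).symm).trans
      (PySem.Dict.foldl_insert_getD_add_one_eq_counter (l.map (fun a => PySem.Str.replace (PySem.Str.stripChars a ".,:;!?") "\n" " ")))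
  · rw [show PySem.List.min? ((l.map (fun a => PySem.Str.replace (PySem.Str.stripChars a ".,:;!?") "\n" " ")).filter (· ≠ "")) PySem.Str.len
        = ((l.map (fun a => PySem.Str.replace (PySem.Str.stripChars a ".,:;!?") "\n" " ")).filter (· ≠ "")).foldl pvMinStep none from by
      unfold PySem.List.min?
      apply List.foldl_ext
      intro acc x hx
      cases acc <;> rfl]
    rw [← pv_skip_empty]
    exact (List.foldl_map (f := fun a => PySem.Str.replace (PySem.Str.stripChars a ".,:;!?") "\n" " ")
      (g := fun (co : Option String) p => if p ≠ "" then pvMinStep co p else co)).symm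
  · rw [show PySem.List.max? ((l.map (fun a => PySem.Str.replace (PySem.Str.stripChars a ".,:;!?") "\n" " ")).filter (· ≠ "")) PySem.Str.len
        = ((l.map (fun a => PySem.Str.replace (PySem.Str.stripChars a ".,:;!?") "\n" " ")).filter (· ≠ "")).foldl pvMaxStep none from by
      unfold PySem.List.max?
      apply List.foldl_ext
      intro acc x hx
      cases acc <;> rfl]
    rw [← pv_skip_empty]
    exact (List.foldl_map (f := fun a => PySem.Str.replace (PySem.Str.stripChars a ".,:;!?") "\n" " ")
      (g := fun (lo : Option String) p => if p ≠ "" then pvMaxStep lo p else lo)).symm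

-- B's items scan is the first-wins max-by-count scan over the keys
lemma pv_items_scan (keys : List String) (g : String → Int) (acc : Option String) :
    (keys.map (fun k => (k, g k))).foldl pvBestStep (acc.map (fun k => (k, g k)))
      = (keys.foldl
          (fun acc k =>
            match acc with
            | none => some k
            | some m => if g m < g k then some k else some m) acc).map
          (fun k => (k, g k)) := by
  induction keys generalizing acc with
  | nil => simp
  | cons k t ih =>
    simp only [List.map_cons, List.foldl_cons]
    cases acc with
    | none => exact ih (some k)
    | some m =>
      by_cases hlt : g m < g k
      · simp only [pvBestStep, Option.map_some, hlt, if_true]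
        exact ih (some k)
      · simp only [pvBestStep, Option.map_some, hlt, if_false]
        exact ih (some m)

-- ===== VERDICT (by name: the statement is the Claim_ definition above) =====
set_option maxHeartbeats 1000000 in
theorem parolakpi_spec : Claim_equal_parolakpi := by
  intro paroledate _hdom hpre
  obtain ⟨a0, ha0, ha0ne'⟩ := hpre
  have ha0ne : PySem.Str.replace (PySem.Str.stripChars a0 ".,:;!?") "\n" " " ≠ "" := ha0ne'
  show parolakpi paroledate = parolakpi_alt paroledate
  unfold parolakpi parolakpi_alt
  dsimp only
  rw [pv_A_fold paroledate [] PySem.Dict.empty (by simp),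
      pv_B_eval paroledate]
  dsimp only
  rw [← PySem.Dict.counter_eq_foldl, List.nil_append]
  -- non-emptiness
  have hmem : (PySem.Str.replace (PySem.Str.stripChars a0 ".,:;!?") "\n" " ") ∈ (paroledate.map (fun a => PySem.Str.replace (PySem.Str.stripChars a ".,:;!?") "\n" " ")).filter (· ≠ "") := by
    rw [List.mem_filter]
    exact ⟨List.mem_map_of_mem ha0, by simpa using ha0ne⟩
  have hlstne : (paroledate.map (fun a => PySem.Str.replace (PySem.Str.stripChars a ".,:;!?") "\n" " ")).filter (· ≠ "") ≠ [] := List.ne_nil_of_mem hmem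
  have hwsne : (PySem.Str.replace (PySem.Str.stripChars a0 ".,:;!?") "\n" " ") ∈ paroledate.map (fun a => PySem.Str.replace (PySem.Str.stripChars a ".,:;!?") "\n" " ") := List.mem_map_of_mem ha0
  obtain ⟨c, hc⟩ : ∃ c, PySem.List.min? ((paroledate.map (fun a => PySem.Str.replace (PySem.Str.stripChars a ".,:;!?") "\n" " ")).filter (· ≠ ""))
      PySem.Str.len = some c := by
    rcases hh : PySem.List.min? ((paroledate.map (fun a => PySem.Str.replace (PySem.Str.stripChars a ".,:;!?") "\n" " ")).filter (· ≠ "")) PySem.Str.len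
      with _ | c
    · exact absurd ((PySem.List.min?_eq_none_iff _ _).mp hh) hlstne
    · exact ⟨c, rfl⟩
  obtain ⟨lg, hlg⟩ : ∃ lg, PySem.List.max? ((paroledate.map (fun a => PySem.Str.replace (PySem.Str.stripChars a ".,:;!?") "\n" " ")).filter (· ≠ ""))
      PySem.Str.len = some lg := by
    rcases hh : PySem.List.max? ((paroledate.map (fun a => PySem.Str.replace (PySem.Str.stripChars a ".,:;!?") "\n" " ")).filter (· ≠ "")) PySem.Str.len
      with _ | lg
    · exact absurd ((PySem.List.max?_eq_none_iff _ _).mp hh) hlstne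
    · exact ⟨lg, rfl⟩
  have hkeysne : (PySem.Dict.counter (paroledate.map (fun a => PySem.Str.replace (PySem.Str.stripChars a ".,:;!?") "\n" " "))).keys ≠ [] := by
    rw [PySem.Dict.keys_counter]
    exact List.ne_nil_of_mem ((PySem.Set.mem_ofList _ _).mpr hwsne)
  obtain ⟨f, hf⟩ : ∃ f, PySem.List.max? (PySem.Dict.counter (paroledate.map (fun a => PySem.Str.replace (PySem.Str.stripChars a ".,:;!?") "\n" " "))).keys
      (fun k => (PySem.Dict.counter (paroledate.map (fun a => PySem.Str.replace (PySem.Str.stripChars a ".,:;!?") "\n" " "))).getD k 0) = some f := by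
    rcases hh : PySem.List.max? (PySem.Dict.counter (paroledate.map (fun a => PySem.Str.replace (PySem.Str.stripChars a ".,:;!?") "\n" " "))).keys
        (fun k => (PySem.Dict.counter (paroledate.map (fun a => PySem.Str.replace (PySem.Str.stripChars a ".,:;!?") "\n" " "))).getD k 0) with _ | f
    · exact absurd ((PySem.List.max?_eq_none_iff _ _).mp hh) hkeysne
    · exact ⟨f, rfl⟩
  -- B's items scan = max? over the keys
  rw [PySem.Dict.items_eq_map_keys _ (PySem.Dict.nodup_keys_counter (paroledate.map (fun a => PySem.Str.replace (PySem.Str.stripChars a ".,:;!?") "\n" " "))) 0]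
  have hscan := pv_items_scan (PySem.Dict.counter (paroledate.map (fun a => PySem.Str.replace (PySem.Str.stripChars a ".,:;!?") "\n" " "))).keys
      (fun k => (PySem.Dict.counter (paroledate.map (fun a => PySem.Str.replace (PySem.Str.stripChars a ".,:;!?") "\n" " "))).getD k 0) none
  simp only [Option.map_none] at hscan
  rw [hscan]
  have hfr : (PySem.Dict.counter (paroledate.map (fun a => PySem.Str.replace (PySem.Str.stripChars a ".,:;!?") "\n" " "))).keys.foldl
      (fun acc k =>
        match acc with
        | none => some k
        | some m => if (PySem.Dict.counter (paroledate.map (fun a => PySem.Str.replace (PySem.Str.stripChars a ".,:;!?") "\n" " "))).getD m 0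
                       < (PySem.Dict.counter (paroledate.map (fun a => PySem.Str.replace (PySem.Str.stripChars a ".,:;!?") "\n" " "))).getD k 0
                    then some k else some m) none
      = PySem.List.max? (PySem.Dict.counter (paroledate.map (fun a => PySem.Str.replace (PySem.Str.stripChars a ".,:;!?") "\n" " "))).keys
          (fun k => (PySem.Dict.counter (paroledate.map (fun a => PySem.Str.replace (PySem.Str.stripChars a ".,:;!?") "\n" " "))).getD k 0) := by
    unfold PySem.List.max?
    apply List.foldl_ext
    intro acc x hx
    cases acc <;> rfl
  rw [hfr, hc, hlg, hf]
  rfl
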